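-- pv_equiv track=rewrite | github.com/GurjyotSingh740-gk/DAA-Budget-Optimization-Project | daaproject.py | greedy_expense_reduction
-- ===== SOURCE A (Python) =====
-- def greedy_expense_reduction(expenses, priorities, savings_goal):
--     sorted_expenses = sorted(expenses.items(), key=lambda x: priorities[x[0]])
--     remaining_goal = savings_goal
--     reductions = []
--
--     for category, amount in sorted_expenses:
--         if remaining_goal <= 0:
--             break
--         reducible_amount = min(amount, remaining_goal)
--         reductions.append((category, reducible_amount))
--         remaining_goal -= reducible_amount
--
--     return reductions
-- ===== SOURCE B (Python) =====
-- def greedy_expense_reduction(expenses, priorities, savings_goal):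
--     if savings_goal <= 0:
--         return []
--     items = sorted(expenses.items(), key=lambda x: priorities[x[0]])
--     # prefix-sum table of the sorted amounts
--     totals = []
--     t = 0
--     for _, a in items:
--         t += a
--         totals.append(t)
--     # first position where the running total reaches the goal
--     cut = next((i for i, c in enumerate(totals) if c >= savings_goal), None)
--     if cut is None:
--         return items
--     before = totals[cut - 1] if cut > 0 else 0
--     return items[:cut] + [(items[cut][0], savings_goal - before)]
-- ===== Notes on version B (the rewrite author's own statement) =====
-- stated objective: alternative
-- what changed: Replaces the single stateful accumulate-and-break loop with a build-prefix-sum-table-then-find-cutoff decomposition: full items before the first index whose running total reaches the goal, one partial boundary item at it, or the whole list if never reached.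
import Mathlib
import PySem

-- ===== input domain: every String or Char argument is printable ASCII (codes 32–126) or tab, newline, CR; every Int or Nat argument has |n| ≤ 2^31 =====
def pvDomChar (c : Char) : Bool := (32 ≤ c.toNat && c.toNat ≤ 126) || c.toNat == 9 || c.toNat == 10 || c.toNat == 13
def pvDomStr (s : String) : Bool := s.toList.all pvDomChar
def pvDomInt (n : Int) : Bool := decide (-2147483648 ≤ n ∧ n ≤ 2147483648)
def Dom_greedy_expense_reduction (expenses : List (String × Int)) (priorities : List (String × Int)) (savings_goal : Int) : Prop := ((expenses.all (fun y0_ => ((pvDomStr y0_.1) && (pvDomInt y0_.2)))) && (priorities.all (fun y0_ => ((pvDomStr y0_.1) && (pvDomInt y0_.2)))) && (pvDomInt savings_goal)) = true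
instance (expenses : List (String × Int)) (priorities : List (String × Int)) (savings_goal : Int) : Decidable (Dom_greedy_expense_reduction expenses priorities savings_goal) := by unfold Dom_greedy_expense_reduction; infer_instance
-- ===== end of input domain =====

-- B replaces A's stateful accumulate-and-break loop by a prefix-sum table plus a
-- first-crossing cutoff index (fulls before the cutoff, one partial at it); alternative decomposition, same cost.

-- ===== PORT A =====
-- the for-loop of A: state = remaining_goal; append = cons onto the recursive result
def pvALoop : List (String × Int) → Int → List (String × Int)
  | [], _ => []
  | (category, amount) :: rest, remaining_goal =>
    if remaining_goal ≤ 0 then []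
    else
      let reducible_amount := min amount remaining_goal
      (category, reducible_amount) :: pvALoop rest (remaining_goal - reducible_amount)

def greedy_expense_reduction (expenses : List (String × Int)) (priorities : List (String × Int)) (savings_goal : Int) : List (String × Int) :=
  let sorted_expenses := PySem.List.sorted expenses (fun x => PySem.Dict.getD (PySem.Dict.mk priorities) x.1 0)
  pvALoop sorted_expenses savings_goal

-- ===== PORT B =====
-- running totals of the sorted amounts (the `for _, a in items` loop of Source B)
def pvTotals : Int → List (String × Int) → List Int
  | _, [] => []
  | t, (_, a) :: rest => (t + a) :: pvTotals (t + a) rest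

-- first index i with totals[i] >= savings_goal (Source B's next(... enumerate ...))
def pvCut (savings_goal : Int) : List Int → Option Nat
  | [] => none
  | c :: rest => if savings_goal ≤ c then some 0 else (pvCut savings_goal rest).map (· + 1)

def greedy_expense_reduction_alt (expenses : List (String × Int)) (priorities : List (String × Int)) (savings_goal : Int) : List (String × Int) :=
  if savings_goal ≤ 0 then []
  else
    let items := PySem.List.sorted expenses (fun x => PySem.Dict.getD (PySem.Dict.mk priorities) x.1 0)
    let totals := pvTotals 0 items
    match pvCut savings_goal totals with
    | none => items
    | some cut =>
      let before := if 0 < cut then totals.getD (cut - 1) 0 else 0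
      items.take cut ++ [((items.getD cut ("", 0)).1, savings_goal - before)]

-- ===== PRECONDITION & SPEC =====
-- Pre_ restricts the dict-typed arguments to the dict domain (no duplicate keys) and excludes the
-- KeyError: A raises when some expense category is missing from priorities.
def Pre_greedy_expense_reduction (expenses : List (String × Int)) (priorities : List (String × Int)) (savings_goal : Int) : Prop :=
  (expenses.map Prod.fst).Nodup ∧ (priorities.map Prod.fst).Nodup ∧
  ∀ p ∈ expenses, p.1 ∈ priorities.map Prod.fst
instance (expenses : List (String × Int)) (priorities : List (String × Int)) (savings_goal : Int) : Decidable (Pre_greedy_expense_reduction expenses priorities savings_goal) := by unfold Pre_greedy_expense_reduction; infer_instance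

def pvWitness_greedy_expense_reduction : (List (String × Int)) × (List (String × Int)) × Int :=
  ([("rent", 5), ("food", 3)], [("rent", 2), ("food", 1)], 6)

def Spec_greedy_expense_reduction (expenses : List (String × Int)) (priorities : List (String × Int)) (savings_goal : Int) (out : List (String × Int)) : Prop := out = greedy_expense_reduction_alt expenses priorities savings_goal
instance (expenses : List (String × Int)) (priorities : List (String × Int)) (savings_goal : Int) (out : List (String × Int)) : Decidable (Spec_greedy_expense_reduction expenses priorities savings_goal out) := by unfold Spec_greedy_expense_reduction; infer_instance

-- ===== CLAIM (what is proved, stated in full; the proofs are below) =====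
def Claim_equal_greedy_expense_reduction : Prop := ∀ (expenses : List (String × Int)) (priorities : List (String × Int)) (savings_goal : Int), Dom_greedy_expense_reduction expenses priorities savings_goal → Pre_greedy_expense_reduction expenses priorities savings_goal → Spec_greedy_expense_reduction expenses priorities savings_goal (greedy_expense_reduction expenses priorities savings_goal)

-- ===== LEMMAS AND PROOFS =====

-- shifting the start total shifts every entry of the table
theorem pvTotals_shift (t : Int) (l : List (String × Int)) :
    pvTotals t l = (pvTotals 0 l).map (t + ·) := by
  induction l generalizing t with
  | nil => simp [pvTotals]
  | cons p rest ih =>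
    obtain ⟨c, a⟩ := p
    simp only [pvTotals, List.map_cons, List.cons.injEq]
    refine ⟨by omega, ?_⟩
    rw [ih (t + a), ih (0 + a), List.map_map]
    apply List.map_congr_left
    intro x _
    simp; omega

theorem pvCut_map_shift (sg t : Int) (l : List Int) :
    pvCut sg (l.map (t + ·)) = pvCut (sg - t) l := by
  induction l with
  | nil => simp [pvCut]
  | cons c rest ih =>
    simp only [List.map_cons, pvCut, ih]
    by_cases h : sg - t ≤ c
    · rw [if_pos (by omega), if_pos h]
    · rw [if_neg (by omega), if_neg h]

theorem pvCut_lt_length (sg : Int) (l : List Int) (k : Nat) (h : pvCut sg l = some k) :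
    k < l.length := by
  induction l generalizing k with
  | nil => simp [pvCut] at h
  | cons c rest ih =>
    simp only [pvCut] at h
    split at h
    · obtain rfl : (0:Nat) = k := by simpa using h
      simp
    · cases hr : pvCut sg rest with
      | none => rw [hr] at h; simp at h
      | some k' =>
        rw [hr] at h
        simp at h
        have := ih k' hr
        simp; omega

theorem pvALoop_nonpos (items : List (String × Int)) (sg : Int) (h : sg ≤ 0) :
    pvALoop items sg = [] := by
  cases items with
  | nil => rfl
  | cons p rest => obtain ⟨c, a⟩ := p; simp [pvALoop, h]

-- the core correspondence: A's stateful loop equals B's table-and-cutoff construction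
theorem pvLoop_eq_cut (items : List (String × Int)) (sg : Int) (hsg : 0 < sg) :
    pvALoop items sg =
      match pvCut sg (pvTotals 0 items) with
      | none => items
      | some cut =>
        (if 0 < cut then (pvTotals 0 items).getD (cut - 1) 0 else 0) |> fun before =>
        items.take cut ++ [((items.getD cut ("", 0)).1, sg - before)] := by
  induction items generalizing sg with
  | nil => simp [pvALoop, pvTotals, pvCut]
  | cons p rest ih =>
    obtain ⟨c, a⟩ := p
    simp only [pvTotals, pvALoop, if_neg (by omega : ¬ sg ≤ 0)]
    by_cases hc : sg ≤ a
    · -- cutoff at index 0: min a sg = sg, next iteration breaks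
      have hmin : min a sg = sg := by omega
      rw [hmin]
      simp only [pvCut, if_pos (by omega : sg ≤ 0 + a)]
      rw [pvALoop_nonpos rest (sg - sg) (by omega)]
      simp [List.getD]
    · -- full item at the head, recurse with sg - a
      have hmin : min a sg = a := by omega
      rw [hmin]
      simp only [pvCut, if_neg (by omega : ¬ sg ≤ 0 + a)]
      rw [pvTotals_shift (0 + a) rest, pvCut_map_shift]
      rw [show (0:Int) + a = a by omega, show sg - a = sg - a from rfl]
      rw [ih (sg - a) (by omega)]
      cases hcut : pvCut (sg - a) (pvTotals 0 rest) with
      | none => simp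
      | some k =>
        have hk := pvCut_lt_length _ _ _ hcut
        simp only [Option.map_some, List.take_succ_cons, List.cons_append,
          List.cons.injEq, true_and]
        have hhead : (((c, a) :: rest).getD (k + 1) ("", 0)).1 = (rest.getD k ("", 0)).1 := by
          simp [List.getD]
        have hbefore :
            (if 0 < k + 1 then (a :: List.map (fun x => a + x) (pvTotals 0 rest)).getD (k + 1 - 1) 0 else 0)
              = a + (if 0 < k then (pvTotals 0 rest).getD (k - 1) 0 else 0) := by
          rw [if_pos (Nat.succ_pos k)]
          rcases Nat.eq_zero_or_pos k with hk0 | hk0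
          · subst hk0; simp [List.getD]
          · rw [if_pos hk0]
            have hidx : k + 1 - 1 = (k - 1) + 1 := by omega
            rw [hidx]
            have hk1 : k - 1 < (pvTotals 0 rest).length := by omega
            simp [List.getD, List.getElem?_cons_succ, List.getElem?_map,
              List.getElem?_eq_getElem hk1]
        rw [hbefore]
        have hsecond : sg - (a + (if 0 < k then (pvTotals 0 rest).getD (k - 1) 0 else 0))
            = sg - a - (if 0 < k then (pvTotals 0 rest).getD (k - 1) 0 else 0) := by omega
        rw [hsecond, hhead]

-- ===== VERDICT (by name: the statement is the Claim_ definition above) =====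
theorem greedy_expense_reduction_spec : Claim_equal_greedy_expense_reduction := by
  intro expenses priorities savings_goal _ _
  unfold Spec_greedy_expense_reduction greedy_expense_reduction greedy_expense_reduction_alt
  by_cases h : savings_goal ≤ 0
  · simp only [if_pos h]
    exact pvALoop_nonpos _ _ h
  · simp only [if_neg h]
    exact pvLoop_eq_cut _ _ (by omega)
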